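-- pv_equiv track=rewrite | github.com/EclectX/HPC | tridiagonal/thomas/new_matrix_analysis/AFPM_D3.py | GroupX6
-- ===== SOURCE A (Python) =====
-- def GroupX6(c,d):
--     pp0 = [0,0,0,0,0,0,0,0]
--     pp1 = [0,0,0,0,0,0,0,0]
--     pp2 = [0,0,0,0,0,0,0,0]
--     pp3 = [0,0,0,0,0,0,0,0]
--
--     clm = [0,0,0,0,0,0,0,0,0,0,0]
--     cry = [0,0,0,0,0,0,0,0,0,0,0]
--     bit = [0,0,0,0,0,0,0,0,0,0,0]
--     result = 0
--
--     for i in range(8):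
--         pp0[i] = c[i] * d[0]
--         pp1[i] = c[i] * d[1]
--         pp2[i] = c[i] * d[2]
--         pp3[i] = c[i] * d[3]
--
--
--     clm[0]  = pp0[0]
--     clm[1]  = pp0[1] + pp1[0]
--     clm[2]  = pp0[2] + pp1[1] + pp2[0]
--     clm[3]  = pp0[3] + pp1[2] + pp2[1] + pp3[0]
--     clm[4]  = pp0[4] + pp1[3] + pp2[2] + pp3[1]
--     clm[5]  = pp0[5] + pp1[4] + pp2[3] + pp3[2]
--     clm[6]  = pp0[6] + pp1[5] + pp2[4] + pp3[3]
--     clm[7]  = pp0[7] + pp1[6] + pp2[5] + pp3[4]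
--     clm[8]  =          pp1[7] + pp2[6] + pp3[5]
--     clm[9]  =                   pp2[7] + pp3[6]
--     clm[10] =                            pp3[7]
--
--     for j in range(11):
--         cry[j] = clm[j] // 2
--         bit[j] = clm[j] %  2
--         if j<=5 :
--             result = result + bit[j]*(2**j)
--         else :
--             result = result + bit[j]*(2**j) + cry[j]*(2**(j+1))
--
--     return result
-- ===== SOURCE B (Python) =====
-- def GroupX6(c, d):
--     # Algebraic identity: for columns j>5 the loop adds bit*2^j + cry*2^(j+1)
--     # = clm[j]*2^j exactly, so the whole high part equals the integer product
--     # C*D minus the low columns' weighted sums; only the six low columns'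
--     # parities are needed explicitly.
--     C = sum(c[i] * 2 ** i for i in range(8))
--     D = sum(d[j] * 2 ** j for j in range(4))
--     result = C * D
--     for k in range(6):
--         col = sum(c[k - j] * d[j] for j in range(min(k, 3) + 1))
--         result += (col % 2 - col) * 2 ** k
--     return result
-- ===== Notes on version B (the rewrite author's own statement) =====
-- stated objective: alternative
-- what changed: Replaces the partial-product arrays and the 11-column carry/bit accumulation loop by the closed-form integer product C*D (C,D the base-2-weighted values of c,d) plus a parity correction for the six low columns, using the identity bit*2^j + cry*2^(j+1) = clm[j]*2^j for the high columns.
import Mathlib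
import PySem

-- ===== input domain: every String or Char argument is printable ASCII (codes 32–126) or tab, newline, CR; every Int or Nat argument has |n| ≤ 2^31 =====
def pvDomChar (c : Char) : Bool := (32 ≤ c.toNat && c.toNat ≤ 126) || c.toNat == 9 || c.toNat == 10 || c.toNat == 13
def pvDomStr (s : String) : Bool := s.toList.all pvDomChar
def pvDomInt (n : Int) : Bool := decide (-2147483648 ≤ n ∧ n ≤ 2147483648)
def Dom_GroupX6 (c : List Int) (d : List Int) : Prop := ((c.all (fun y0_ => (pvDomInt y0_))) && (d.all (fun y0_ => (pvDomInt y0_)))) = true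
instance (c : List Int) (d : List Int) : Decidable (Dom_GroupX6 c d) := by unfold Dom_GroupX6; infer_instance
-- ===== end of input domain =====

-- ===== PORT A =====
-- A builds four partial-product arrays pp0..pp3, eleven hardcoded column sums,
-- then a carry/bit accumulation loop.
def GroupX6 (c : List Int) (d : List Int) : Int :=
  let pp0 := (List.range 8).map (fun i => c.getD i 0 * d.getD 0 0)
  let pp1 := (List.range 8).map (fun i => c.getD i 0 * d.getD 1 0)
  let pp2 := (List.range 8).map (fun i => c.getD i 0 * d.getD 2 0)
  let pp3 := (List.range 8).map (fun i => c.getD i 0 * d.getD 3 0)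
  let clm : List Int :=
    [ pp0.getD 0 0,
      pp0.getD 1 0 + pp1.getD 0 0,
      pp0.getD 2 0 + pp1.getD 1 0 + pp2.getD 0 0,
      pp0.getD 3 0 + pp1.getD 2 0 + pp2.getD 1 0 + pp3.getD 0 0,
      pp0.getD 4 0 + pp1.getD 3 0 + pp2.getD 2 0 + pp3.getD 1 0,
      pp0.getD 5 0 + pp1.getD 4 0 + pp2.getD 3 0 + pp3.getD 2 0,
      pp0.getD 6 0 + pp1.getD 5 0 + pp2.getD 4 0 + pp3.getD 3 0,
      pp0.getD 7 0 + pp1.getD 6 0 + pp2.getD 5 0 + pp3.getD 4 0,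
      pp1.getD 7 0 + pp2.getD 6 0 + pp3.getD 5 0,
      pp2.getD 7 0 + pp3.getD 6 0,
      pp3.getD 7 0 ]
  (List.range 11).foldl (fun result j =>
    let cry := PySem.Int.floordiv (clm.getD j 0) 2
    let bit := PySem.Int.mod (clm.getD j 0) 2
    if j ≤ 5 then result + bit * 2 ^ j
    else result + bit * 2 ^ j + cry * 2 ^ (j + 1)) 0

-- ===== PORT B =====
-- B computes the base-2-weighted values C and D, starts from the closed-form
-- product C*D and corrects the six low columns by their parity
-- (result += (col % 2 - col) * 2^k), following Source B line by line.
def GroupX6_alt (c : List Int) (d : List Int) : Int :=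
  let C := (List.range 8).foldl (fun s i => s + c.getD i 0 * 2 ^ i) 0
  let D := (List.range 4).foldl (fun s j => s + d.getD j 0 * 2 ^ j) 0
  (List.range 6).foldl (fun result k =>
    let col := (List.range (min k 3 + 1)).foldl
      (fun s j => s + c.getD (k - j) 0 * d.getD j 0) 0
    result + (PySem.Int.mod col 2 - col) * 2 ^ k) (C * D)

-- ===== PRECONDITION & SPEC =====
-- Pre excludes exactly the inputs where A raises IndexError: c shorter than 8 or d shorter than 4.
def Pre_GroupX6 (c : List Int) (d : List Int) : Prop := 8 ≤ c.length ∧ 4 ≤ d.length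
instance (c : List Int) (d : List Int) : Decidable (Pre_GroupX6 c d) := by unfold Pre_GroupX6; infer_instance
def pvWitness_GroupX6 : List Int × List Int := ([1, 2, 3, 4, 5, 6, 7, 8], [1, 2, 3, 4])
def Spec_GroupX6 (c : List Int) (d : List Int) (out : Int) : Prop := out = GroupX6_alt c d
instance (c : List Int) (d : List Int) (out : Int) : Decidable (Spec_GroupX6 c d out) := by unfold Spec_GroupX6; infer_instance

-- ===== CLAIM =====
def Claim_equal_GroupX6 : Prop := ∀ (c : List Int) (d : List Int), Dom_GroupX6 c d → Pre_GroupX6 c d → Spec_GroupX6 c d (GroupX6 c d)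

-- ===== LEMMAS AND PROOFS =====

-- ===== VERDICT =====
theorem GroupX6_spec : Claim_equal_GroupX6 := by
  intro c d _ hpre
  unfold Spec_GroupX6
  obtain ⟨hc, hd⟩ := hpre
  match c, d with
  | c0 :: c1 :: c2 :: c3 :: c4 :: c5 :: c6 :: c7 :: ct, d0 :: d1 :: d2 :: d3 :: dt =>
    simp only [GroupX6, GroupX6_alt, List.range_succ, List.range_zero,
      List.map_cons, List.map_nil, List.foldl_append,
      List.foldl_cons, List.foldl_nil, List.nil_append, List.cons_append,
      List.getD_cons_zero, List.getD_cons_succ]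
    norm_num
    norm_num [List.range_succ]
    have h6 := Int.mul_ediv_add_emod (c6 * d0 + c5 * d1 + c4 * d2 + c3 * d3) 2
    have h7 := Int.mul_ediv_add_emod (c7 * d0 + c6 * d1 + c5 * d2 + c4 * d3) 2
    have h8 := Int.mul_ediv_add_emod (c7 * d1 + c6 * d2 + c5 * d3) 2
    have h9 := Int.mul_ediv_add_emod (c7 * d2 + c6 * d3) 2
    have h10 := Int.mul_ediv_add_emod (c7 * d3) 2
    linear_combination 64 * h6 + 128 * h7 + 256 * h8 + 512 * h9 + 1024 * h10
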